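-- pv_equiv track=rewrite | github.com/ReginaKirana/ExecuRizz | Practice 4 - Decrease and Conquer/Hidup Santai/santai.py | compute_unhappiness
-- ===== SOURCE A (Python) =====
-- def compute_unhappiness(arr):
--     n = len(arr)
--     cost = [[0] * n for _ in range(n)]
--
--     for i in range(n):
--         black = white = 0
--         for j in range(i, n):
--             if arr[j] == 1:
--                 black += 1
--             else:
--                 white += 1
--             cost[i][j] = black * white
--
--     return cost
-- ===== SOURCE B (Python) =====
-- def compute_unhappiness(arr):
--     n = len(arr)
--     # prefix counts: ones[k] = number of 1s among arr[0..k-1]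
--     ones = [0]
--     c = 0
--     for k in range(n):
--         if arr[k] == 1:
--             c += 1
--         ones.append(c)
--     res = []
--     for i in range(n):
--         row = []
--         for j in range(n):
--             if j < i:
--                 row.append(0)
--             else:
--                 black = ones[j + 1] - ones[i]
--                 white = (j - i + 1) - black
--                 row.append(black * white)
--         res.append(row)
--     return res
-- ===== Notes on version B (the rewrite author's own statement) =====
-- stated objective: alternative
-- what changed: B builds a prefix-count array of 1s once and fills each cell by the closed form (ones[j+1]-ones[i])*((j-i+1)-(ones[j+1]-ones[i])), instead of A's per-row incremental black/white counters mutating a preallocated matrix.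
import Mathlib
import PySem

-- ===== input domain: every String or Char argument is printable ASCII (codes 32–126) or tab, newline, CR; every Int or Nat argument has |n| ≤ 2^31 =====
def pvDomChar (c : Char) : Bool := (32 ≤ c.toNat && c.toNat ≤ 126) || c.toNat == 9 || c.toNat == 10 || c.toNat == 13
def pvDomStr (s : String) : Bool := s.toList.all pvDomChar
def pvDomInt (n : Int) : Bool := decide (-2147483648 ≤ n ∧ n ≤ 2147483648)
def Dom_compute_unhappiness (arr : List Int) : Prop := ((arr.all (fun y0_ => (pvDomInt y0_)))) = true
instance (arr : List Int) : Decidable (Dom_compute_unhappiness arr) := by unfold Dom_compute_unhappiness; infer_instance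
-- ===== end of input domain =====

-- B replaces A's per-row running black/white counters by a prefix-count array of 1s and a
-- closed-form per-cell formula; same O(n^2) cost, a different decomposition.

-- ===== PORT A =====
-- A mutates a preallocated n×n zero matrix: for each i, running black/white counters over
-- j = i..n-1 set cost[i][j] = black*white.  The in-place 2D mutation is ported as folds of
-- List.set; arr[j] is always in range, so it is ported as arr.getD j 0 (exact here).
def compute_unhappiness (arr : List Int) : List (List Int) :=
  let n := arr.length
  let cost : List (List Int) := (List.range n).map (fun _ => List.replicate n (0 : Int))
  (List.range n).foldl
    (fun cost i =>
      let row := cost.getD i []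
      let row' := (((List.range' i (n - i)).foldl
        (fun (st : Int × Int × List Int) j =>
          let black := if arr.getD j 0 == 1 then st.1 + 1 else st.1
          let white := if arr.getD j 0 == 1 then st.2.1 else st.2.1 + 1
          (black, white, st.2.2.set j (black * white)))
        (0, 0, row))).2.2
      cost.set i row')
    cost

-- ===== PORT B =====
-- B: one pass builds ones[k] = number of 1s among arr[0..k-1]; each cell is then the
-- closed form black*white with black = ones[j+1]-ones[i], white = (j-i+1)-black.
def compute_unhappiness_alt (arr : List Int) : List (List Int) :=
  let n := arr.length
  let ones := ((List.range n).foldl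
    (fun (st : Int × List Int) k =>
      let c := if arr.getD k 0 == 1 then st.1 + 1 else st.1
      (c, st.2 ++ [c])) (0, ([0] : List Int))).2
  (List.range n).map (fun i =>
    (List.range n).map (fun j =>
      if j < i then 0
      else
        let black := ones.getD (j + 1) 0 - ones.getD i 0
        let white := ((j : Int) - (i : Int) + 1) - black
        black * white))

-- ===== PRECONDITION & SPEC =====
def Spec_compute_unhappiness (arr : List Int) (out : List (List Int)) : Prop := out = compute_unhappiness_alt arr
instance (arr : List Int) (out : List (List Int)) : Decidable (Spec_compute_unhappiness arr out) := by unfold Spec_compute_unhappiness; infer_instance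

-- ===== CLAIM (what is proved, stated in full; the proofs are below) =====
def Claim_equal_compute_unhappiness : Prop := ∀ (arr : List Int), Dom_compute_unhappiness arr → Spec_compute_unhappiness arr (compute_unhappiness arr)

-- ===== LEMMAS AND PROOFS =====


def pvO (arr : List Int) (s t : Nat) : Int :=
  ((List.range' s t).map (fun k => if arr.getD k 0 == 1 then (1 : Int) else 0)).sum

theorem pvO_zero (arr : List Int) (s : Nat) : pvO arr s 0 = 0 := rfl

theorem pvO_succ_front (arr : List Int) (s t : Nat) :
    pvO arr s (t + 1) = (if arr.getD s 0 == 1 then (1 : Int) else 0) + pvO arr (s + 1) t := by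
  simp [pvO, List.range'_succ]

theorem pvO_concat (arr : List Int) (s t : Nat) :
    pvO arr s (t + 1) = pvO arr s t + (if arr.getD (s + t) 0 == 1 then (1 : Int) else 0) := by
  simp [pvO, List.range'_concat]

theorem pvO_add (arr : List Int) (s a b : Nat) :
    pvO arr s (a + b) = pvO arr s a + pvO arr (s + a) b := by
  induction b with
  | zero => simp [pvO_zero]
  | succ b ih =>
      have h : s + a + b = s + (a + b) := by omega
      rw [show a + (b + 1) = (a + b) + 1 from rfl, pvO_concat, ih, pvO_concat, h]
      ring

def pvOnesStep (arr : List Int) (st : Int × List Int) (k : Nat) : Int × List Int :=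
  let c := if arr.getD k 0 == 1 then st.1 + 1 else st.1
  (c, st.2 ++ [c])

theorem onesFold (arr : List Int) (n : Nat) :
    (List.range n).foldl (pvOnesStep arr) (0, ([0] : List Int))
    = (pvO arr 0 n, (List.range (n + 1)).map (fun k => pvO arr 0 k)) := by
  induction n with
  | zero => simp [pvO_zero, List.range_succ]
  | succ n ih =>
      rw [List.range_succ, List.foldl_append, ih]
      have h1 : pvO arr 0 (n + 1) = pvO arr 0 n + (if arr.getD n 0 == 1 then (1 : Int) else 0) := by
        simpa using pvO_concat arr 0 n
      simp only [List.foldl_cons, List.foldl_nil, pvOnesStep]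
      rw [List.range_succ (n := n + 1), List.map_append, List.map_cons, List.map_nil]
      by_cases h : (arr.getD n 0 == 1) = true
      · rw [if_pos h] at h1 ⊢
        rw [h1]
      · rw [if_neg h] at h1 ⊢
        rw [h1, add_zero]

def pvRowStep (arr : List Int) (st : Int × Int × List Int) (j : Nat) : Int × Int × List Int :=
  let black := if arr.getD j 0 == 1 then st.1 + 1 else st.1
  let white := if arr.getD j 0 == 1 then st.2.1 else st.2.1 + 1
  (black, white, st.2.2.set j (black * white))

theorem rowFold_length (arr : List Int) :
    ∀ (k s : Nat) (b w : Int) (row : List Int),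
      (((List.range' s k).foldl (pvRowStep arr) (b, w, row)).2.2).length = row.length := by
  intro k
  induction k with
  | zero => intro s b w row; simp
  | succ k ih =>
      intro s b w row
      rw [List.range'_succ, List.foldl_cons]
      rw [ih]
      simp [pvRowStep]

theorem rowFold_getD (arr : List Int) (j : Nat) :
    ∀ (k s : Nat) (b w : Int) (row : List Int), s + k ≤ row.length →
      (((List.range' s k).foldl (pvRowStep arr) (b, w, row)).2.2).getD j 0 =
      if s ≤ j ∧ j < s + k then
        (b + pvO arr s (j + 1 - s)) * (w + ((j + 1 - s : Nat) : Int) - pvO arr s (j + 1 - s))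
      else row.getD j 0 := by
  intro k
  induction k with
  | zero =>
      intro s b w row _
      have h : ¬ (s ≤ j ∧ j < s + 0) := by omega
      simp [h]
  | succ k ih =>
      intro s b w row hlen
      rw [List.range'_succ, List.foldl_cons]
      by_cases h : (arr.getD s 0 == 1) = true <;>
      [ (have hstep : pvRowStep arr (b, w, row) s = (b + 1, w, row.set s ((b + 1) * w)) := by
          simp only [pvRowStep, if_pos h]);
        (have hstep : pvRowStep arr (b, w, row) s = (b, w + 1, row.set s (b * (w + 1))) := by
          simp only [pvRowStep, if_neg h]) ] <;>
      · rw [hstep, ih (s + 1) _ _ _ (by rw [List.length_set]; omega)]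
        by_cases h1 : (s + 1) ≤ j ∧ j < (s + 1) + k
        · have h2 : s ≤ j ∧ j < s + (k + 1) := by omega
          rw [if_pos h1, if_pos h2]
          have hfront : pvO arr s (j + 1 - s)
              = (if arr.getD s 0 == 1 then (1 : Int) else 0) + pvO arr (s + 1) (j - s) := by
            rw [show j + 1 - s = (j - s) + 1 from by omega, pvO_succ_front]
          rw [show j + 1 - (s + 1) = j - s from by omega]
          rw [show ((j + 1 - s : Nat) : Int) = ((j - s : Nat) : Int) + 1 from by omega]
          first
            | (rw [if_pos h] at hfront; rw [hfront]; ring)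
            | (rw [if_neg h] at hfront; rw [hfront]; ring)
        · by_cases hj : j = s
          · subst hj
            have h2 : j ≤ j ∧ j < j + (k + 1) := by omega
            rw [if_neg h1, if_pos h2]
            have hjl : j < row.length := by omega
            have hset : ∀ v : Int, (row.set j v).getD j 0 = v := by
              intro v
              simp [List.getD_eq_getElem?_getD, List.getElem?_set, hjl]
            rw [hset]
            have hone := pvO_concat arr j 0
            rw [show j + 1 - j = 1 from by omega]
            rw [add_zero] at hone
            rw [hone, pvO_zero, zero_add, Nat.cast_one]
            first
              | (rw [if_pos h]; ring)
              | (rw [if_neg h]; ring)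
          · have h2 : ¬ (s ≤ j ∧ j < s + (k + 1)) := by omega
            rw [if_neg h1, if_neg h2]
            have hsj : ¬ s = j := fun h' => hj h'.symm
            simp [List.getD_eq_getElem?_getD, List.getElem?_set, hsj]

-- the row A computes for index i, as a function of the row's previous contents
def pvRowF (arr : List Int) (i : Nat) (row : List Int) : List Int :=
  (((List.range' i (arr.length - i)).foldl (pvRowStep arr) (0, 0, row))).2.2


theorem matFold_getD {α : Type} (f : Nat → α → α) (d : α) (j : Nat) :
    ∀ (k s : Nat) (m : List α), s + k ≤ m.length →
      (((List.range' s k).foldl (fun m i => m.set i (f i (m.getD i d))) m)).getD j d =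
      if s ≤ j ∧ j < s + k then f j (m.getD j d) else m.getD j d := by
  intro k
  induction k with
  | zero =>
      intro s m _
      have h : ¬ (s ≤ j ∧ j < s + 0) := by omega
      simp [h]
  | succ k ih =>
      intro s m hlen
      rw [List.range'_succ, List.foldl_cons]
      have hsl : s < m.length := by omega
      have hlen' : (s + 1) + k ≤ (m.set s (f s (m.getD s d))).length := by
        rw [List.length_set]; omega
      rw [ih (s + 1) _ hlen']
      by_cases h1 : (s + 1) ≤ j ∧ j < (s + 1) + k
      · have h2 : s ≤ j ∧ j < s + (k + 1) := by omega
        have hjs : ¬ s = j := by omega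
        simp [h1, h2, List.getD_eq_getElem?_getD, List.getElem?_set, hjs]
      · by_cases hj : j = s
        · subst hj
          have h2 : j ≤ j ∧ j < j + (k + 1) := by omega
          simp [h1, h2, List.getD_eq_getElem?_getD, List.getElem?_set, hsl]
        · have h2 : ¬ (s ≤ j ∧ j < s + (k + 1)) := by omega
          have hsj : ¬ s = j := fun h' => hj h'.symm
          have h3 : ¬ (s < j ∧ j < s + 1 + k) := by omega
          simp [h2, h3, List.getD_eq_getElem?_getD, List.getElem?_set, hsj]

theorem matFold_length {α : Type} (f : Nat → α → α) (d : α) :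
    ∀ (k s : Nat) (m : List α),
      (((List.range' s k).foldl (fun m i => m.set i (f i (m.getD i d))) m)).length = m.length := by
  intro k
  induction k with
  | zero => intro s m; simp
  | succ k ih =>
      intro s m
      rw [List.range'_succ, List.foldl_cons, ih, List.length_set]

theorem matFold_getD_range {α : Type} (f : Nat → α → α) (d : α) (j n : Nat) (m : List α)
    (h : n ≤ m.length) :
    (((List.range n).foldl (fun m i => m.set i (f i (m.getD i d))) m)).getD j d =
    if j < n then f j (m.getD j d) else m.getD j d := by
  rw [List.range_eq_range', matFold_getD f d j n 0 m (by omega)]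
  by_cases hj : j < n
  · rw [if_pos (show 0 ≤ j ∧ j < 0 + n from ⟨by omega, by omega⟩), if_pos hj]
  · rw [if_neg (show ¬ (0 ≤ j ∧ j < 0 + n) from by omega), if_neg hj]

theorem matFold_length_range {α : Type} (f : Nat → α → α) (d : α) (n : Nat) (m : List α) :
    (((List.range n).foldl (fun m i => m.set i (f i (m.getD i d))) m)).length = m.length := by
  rw [List.range_eq_range', matFold_length]

-- ===== VERDICT (by name: the statement is the Claim_ definition above) =====
theorem compute_unhappiness_spec : Claim_equal_compute_unhappiness := by
  intro arr _
  unfold Spec_compute_unhappiness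
  show ((List.range arr.length).foldl
      (fun cost i => cost.set i (pvRowF arr i (cost.getD i [])))
      ((List.range arr.length).map (fun _ => List.replicate arr.length (0 : Int))))
    = ((List.range arr.length).map (fun i =>
        (List.range arr.length).map (fun j =>
          if j < i then 0
          else
            let black := (((List.range arr.length).foldl (pvOnesStep arr) (0, ([0] : List Int))).2).getD (j + 1) 0 -
              (((List.range arr.length).foldl (pvOnesStep arr) (0, ([0] : List Int))).2).getD i 0
            let white := ((j : Int) - (i : Int) + 1) - black
            black * white)))
  rw [onesFold arr arr.length]
  set n := arr.length with hn
  apply List.ext_getElem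
  · rw [matFold_length_range]
    simp
  · intro i hi1 hi2
    have hin : i < n := by simpa using hi2
    have hgetD :
        ((List.range n).foldl (fun cost i => cost.set i (pvRowF arr i (cost.getD i [])))
          ((List.range n).map (fun _ => List.replicate n (0 : Int)))).getD i [] =
        pvRowF arr i (List.replicate n (0 : Int)) := by
      rw [matFold_getD_range (f := pvRowF arr) (d := ([] : List Int)) i n
          ((List.range n).map (fun _ => List.replicate n (0 : Int))) (by simp)]
      rw [if_pos hin]
      simp [List.getD_eq_getElem?_getD, List.getElem?_map, List.getElem?_range, hin]
    have hl :
        ((List.range n).foldl (fun cost i => cost.set i (pvRowF arr i (cost.getD i [])))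
          ((List.range n).map (fun _ => List.replicate n (0 : Int))))[i] =
        pvRowF arr i (List.replicate n (0 : Int)) := by
      rw [← hgetD, List.getD_eq_getElem?_getD, List.getElem?_eq_getElem hi1]
      rfl
    rw [hl, List.getElem_map, List.getElem_range]
    -- rows are equal
    apply List.ext_getElem
    · rw [pvRowF, rowFold_length]
      simp
    · intro j hj1 hj2
      have hjn : j < n := by simpa using hj2
      have hlhs : (pvRowF arr i (List.replicate n (0 : Int)))[j]'hj1 =
          (pvRowF arr i (List.replicate n (0 : Int))).getD j 0 := by
        rw [List.getD_eq_getElem?_getD, List.getElem?_eq_getElem hj1]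
        rfl
      rw [hlhs, pvRowF, ← hn,
        rowFold_getD arr j (n - i) i 0 0 (List.replicate n (0 : Int)) (by rw [List.length_replicate]; omega)]
      have hones : ∀ m : Nat, m < n + 1 →
          ((List.range (n + 1)).map (fun k => pvO arr 0 k)).getD m 0 = pvO arr 0 m := by
        intro m hm
        simp [List.getD_eq_getElem?_getD, List.getElem?_map, List.getElem?_range, hm]
      rw [List.getElem_map, List.getElem_range]
      by_cases hij : i ≤ j
      · have hc1 : i ≤ j ∧ j < i + (n - i) := by omega
        have hc2 : ¬ (j < i) := by omega
        rw [if_pos hc1, if_neg hc2]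
        simp only []
        rw [hones (j + 1) (by omega), hones i (by omega)]
        have hsplit : pvO arr 0 (j + 1) = pvO arr 0 i + pvO arr i (j + 1 - i) := by
          have h := pvO_add arr 0 i (j + 1 - i)
          rw [show i + (j + 1 - i) = j + 1 from by omega] at h
          simpa using h
        have hcast : ((j + 1 - i : Nat) : Int) = (j : Int) - (i : Int) + 1 := by omega
        rw [hsplit, hcast]
        ring
      · have hc1 : ¬ (i ≤ j ∧ j < i + (n - i)) := by omega
        have hc2 : j < i := by omega
        rw [if_neg hc1, if_pos hc2]
        simp [List.getD_eq_getElem?_getD, List.getElem?_replicate, hjn]
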